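-- pv_equiv track=rewrite | github.com/gil9red/SimplePyScripts | visual_diff_two_structures/utils.py | get_filling_in_missing
-- ===== SOURCE A (Python) =====
-- def get_filling_in_missing(
--     items_1: list[str],
--     items_2: list[str],
--     fill_empty_spaces: bool = False,
-- ) -> tuple[list[str], list[str]]:
--     common_keys = sorted(set(items_1 + items_2))
--
--     result_1: list[str] = []
--     result_2: list[str] = []
--
--     for key in common_keys:
--         empty = (" " * len(key)) if fill_empty_spaces else ""
--
--         result_1.append(key if key in items_1 else empty)
--         result_2.append(key if key in items_2 else empty)
--
--     return result_1, result_2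
-- ===== SOURCE B (Python) =====
-- def get_filling_in_missing(
--     items_1: list[str],
--     items_2: list[str],
--     fill_empty_spaces: bool = False,
-- ) -> tuple[list[str], list[str]]:
--     s1 = sorted(set(items_1))
--     s2 = sorted(set(items_2))
--
--     result_1: list[str] = []
--     result_2: list[str] = []
--
--     i = j = 0
--     while i < len(s1) and j < len(s2):
--         a, b = s1[i], s2[j]
--         if a == b:
--             result_1.append(a)
--             result_2.append(a)
--             i += 1
--             j += 1
--         elif a < b:
--             result_1.append(a)
--             result_2.append((" " * len(a)) if fill_empty_spaces else "")
--             i += 1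
--         else:
--             result_1.append((" " * len(b)) if fill_empty_spaces else "")
--             result_2.append(b)
--             j += 1
--     while i < len(s1):
--         a = s1[i]
--         result_1.append(a)
--         result_2.append((" " * len(a)) if fill_empty_spaces else "")
--         i += 1
--     while j < len(s2):
--         b = s2[j]
--         result_1.append((" " * len(b)) if fill_empty_spaces else "")
--         result_2.append(b)
--         j += 1
--
--     return result_1, result_2
-- ===== Notes on version B (the rewrite author's own statement) =====
-- stated objective: faster
-- what changed: Replaces the per-key membership scans over the original lists (a linear scan per union key) with a two-pointer merge of the two independently sorted-deduplicated lists, so membership is read off the merge itself.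
import Mathlib
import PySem

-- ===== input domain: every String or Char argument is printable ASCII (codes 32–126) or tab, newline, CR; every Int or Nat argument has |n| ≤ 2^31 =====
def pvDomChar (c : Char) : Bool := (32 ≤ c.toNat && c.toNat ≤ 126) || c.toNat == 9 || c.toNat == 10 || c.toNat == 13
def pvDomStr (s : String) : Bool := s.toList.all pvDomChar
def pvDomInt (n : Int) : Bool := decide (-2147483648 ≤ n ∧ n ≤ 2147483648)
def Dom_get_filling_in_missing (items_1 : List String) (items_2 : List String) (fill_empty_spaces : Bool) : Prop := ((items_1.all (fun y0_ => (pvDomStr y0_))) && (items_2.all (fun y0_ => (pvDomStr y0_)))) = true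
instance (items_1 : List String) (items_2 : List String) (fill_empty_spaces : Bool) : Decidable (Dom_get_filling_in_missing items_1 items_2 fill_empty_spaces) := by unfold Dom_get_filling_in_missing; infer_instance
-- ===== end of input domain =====

-- B replaces A's per-key membership scans over the original lists with a two-pointer merge
-- of the two independently sorted-deduplicated lists (objective: faster).


-- ===== PORT A =====
-- (" " * len(key)) if fill_empty_spaces else "" — ported by hand: exact, len(key) is the
-- number of code points and " " * n is n spaces.
def pvEmpty (fill : Bool) (key : String) : String :=
  if fill then String.ofList (List.replicate key.toList.length ' ') else ""

def get_filling_in_missing (items_1 : List String) (items_2 : List String) (fill_empty_spaces : Bool) : List String × List String :=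
  let common_keys := PySem.List.sorted (PySem.Set.ofList (items_1 ++ items_2)) (fun x => x) false
  common_keys.foldl
    (fun r key =>
      let empty := pvEmpty fill_empty_spaces key
      (r.1 ++ [if key ∈ items_1 then key else empty],
       r.2 ++ [if key ∈ items_2 then key else empty]))
    ([], [])

-- ===== PORT B =====
-- the while-loop with two indices i, j plus the two drain loops, as recursion on the two lists
def pvMerge (fill : Bool) : List String → List String → List String × List String
  | [], ys => (ys.map (pvEmpty fill), ys)
  | xs, [] => (xs, xs.map (pvEmpty fill))
  | a :: xs, b :: ys =>
    if a = b then
      let r := pvMerge fill xs ys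
      (a :: r.1, a :: r.2)
    else if a < b then
      let r := pvMerge fill xs (b :: ys)
      (a :: r.1, pvEmpty fill a :: r.2)
    else
      let r := pvMerge fill (a :: xs) ys
      (pvEmpty fill b :: r.1, b :: r.2)
termination_by xs ys => xs.length + ys.length

def get_filling_in_missing_alt (items_1 : List String) (items_2 : List String) (fill_empty_spaces : Bool) : List String × List String :=
  let s1 := PySem.List.sorted (PySem.Set.ofList items_1) (fun x => x) false
  let s2 := PySem.List.sorted (PySem.Set.ofList items_2) (fun x => x) false
  pvMerge fill_empty_spaces s1 s2

-- ===== PRECONDITION & SPEC =====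
def Spec_get_filling_in_missing (items_1 : List String) (items_2 : List String) (fill_empty_spaces : Bool) (out : List String × List String) : Prop := out = get_filling_in_missing_alt items_1 items_2 fill_empty_spaces
instance (items_1 : List String) (items_2 : List String) (fill_empty_spaces : Bool) (out : List String × List String) : Decidable (Spec_get_filling_in_missing items_1 items_2 fill_empty_spaces out) := by unfold Spec_get_filling_in_missing; infer_instance

-- ===== CLAIM (what is proved, stated in full; the proofs are below) =====
def Claim_equal_get_filling_in_missing : Prop := ∀ (items_1 : List String) (items_2 : List String) (fill_empty_spaces : Bool), Dom_get_filling_in_missing items_1 items_2 fill_empty_spaces → Spec_get_filling_in_missing items_1 items_2 fill_empty_spaces (get_filling_in_missing items_1 items_2 fill_empty_spaces)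

-- ===== LEMMAS AND PROOFS =====

-- the key sequence produced by the merge
def pvKeys : List String → List String → List String
  | [], ys => ys
  | xs, [] => xs
  | a :: xs, b :: ys =>
    if a = b then a :: pvKeys xs ys
    else if a < b then a :: pvKeys xs (b :: ys)
    else b :: pvKeys (a :: xs) ys
termination_by xs ys => xs.length + ys.length

theorem mem_pvKeys (xs ys : List String) (k : String) :
    k ∈ pvKeys xs ys ↔ k ∈ xs ∨ k ∈ ys := by
  induction xs, ys using pvKeys.induct with
  | case1 ys => simp [pvKeys]
  | case2 xs h => rw [pvKeys.eq_2 xs h]; simp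
  | case3 xs b ys ih => rw [pvKeys, if_pos rfl]; simp [ih]; tauto
  | case4 a xs b ys hab hlt ih => rw [pvKeys, if_neg hab, if_pos hlt]; simp [ih]; tauto
  | case5 a xs b ys hab hlt ih => rw [pvKeys, if_neg hab, if_neg hlt]; simp [ih]; tauto

theorem pairwise_pvKeys (xs ys : List String)
    (hx : xs.Pairwise (· < ·)) (hy : ys.Pairwise (· < ·)) :
    (pvKeys xs ys).Pairwise (· < ·) := by
  induction xs, ys using pvKeys.induct with
  | case1 ys => rwa [pvKeys]
  | case2 xs h => rwa [pvKeys.eq_2 xs h]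
  | case3 xs b ys ih =>
    rw [pvKeys, if_pos rfl]
    rw [List.pairwise_cons] at hx hy ⊢
    refine ⟨fun k hk => ?_, ih hx.2 hy.2⟩
    rcases (mem_pvKeys _ _ _).1 hk with h | h
    · exact hx.1 k h
    · exact hy.1 k h
  | case4 a xs b ys hab hlt ih =>
    rw [pvKeys, if_neg hab, if_pos hlt]
    rw [List.pairwise_cons] at hx ⊢
    refine ⟨fun k hk => ?_, ih hx.2 hy⟩
    rcases (mem_pvKeys _ _ _).1 hk with h | h
    · exact hx.1 k h
    · rcases List.mem_cons.1 h with rfl | h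
      · exact hlt
      · exact lt_trans hlt ((List.pairwise_cons.1 hy).1 k h)
  | case5 a xs b ys hab hlt ih =>
    have hba : b < a := by
      rcases lt_trichotomy a b with h | h | h
      · exact absurd h hlt
      · exact absurd h hab
      · exact h
    rw [pvKeys, if_neg hab, if_neg hlt]
    rw [List.pairwise_cons] at hy ⊢
    refine ⟨fun k hk => ?_, ih hx hy.2⟩
    rcases (mem_pvKeys _ _ _).1 hk with h | h
    · rcases List.mem_cons.1 h with rfl | h
      · exact hba
      · exact lt_trans hba ((List.pairwise_cons.1 hx).1 k h)
    · exact hy.1 k h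

theorem pvMerge_eq (fill : Bool) (xs ys : List String)
    (hx : xs.Pairwise (· < ·)) (hy : ys.Pairwise (· < ·)) :
    pvMerge fill xs ys =
      ((pvKeys xs ys).map (fun k => if k ∈ xs then k else pvEmpty fill k),
       (pvKeys xs ys).map (fun k => if k ∈ ys then k else pvEmpty fill k)) := by
  induction xs, ys using pvKeys.induct with
  | case1 ys =>
    rw [pvMerge, pvKeys, Prod.mk.injEq]
    constructor
    · exact (List.map_congr_left (fun k hk => by simp)).symm
    · refine ((List.map_congr_left (fun k hk => by simp [hk])).trans (List.map_id' ys)).symm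
  | case2 xs h =>
    rw [pvMerge.eq_2 fill xs h, pvKeys.eq_2 xs h, Prod.mk.injEq]
    constructor
    · refine ((List.map_congr_left (fun k hk => by simp [hk])).trans (List.map_id' xs)).symm
    · exact (List.map_congr_left (fun k hk => by simp)).symm
  | case3 xs b ys ih =>
    rw [List.pairwise_cons] at hx hy
    have hkgt : ∀ k ∈ pvKeys xs ys, b < k := by
      intro k hk
      rcases (mem_pvKeys _ _ _).1 hk with h | h
      · exact hx.1 k h
      · exact hy.1 k h
    rw [pvMerge, pvKeys]
    simp only [if_true]
    rw [ih hx.2 hy.2]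
    simp only [List.map_cons, Prod.mk.injEq]
    constructor
    · rw [if_pos (List.mem_cons_self ..)]
      refine congrArg _ (List.map_congr_left fun k hk => ?_)
      simp [List.mem_cons, (hkgt k hk).ne']
    · rw [if_pos (List.mem_cons_self ..)]
      refine congrArg _ (List.map_congr_left fun k hk => ?_)
      simp [List.mem_cons, (hkgt k hk).ne']
  | case4 a xs b ys hab hlt ih =>
    rw [List.pairwise_cons] at hx
    have hka : ∀ k ∈ pvKeys xs (b :: ys), a < k := by
      intro k hk
      rcases (mem_pvKeys _ _ _).1 hk with h | h
      · exact hx.1 k h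
      · rcases List.mem_cons.1 h with rfl | h
        · exact hlt
        · exact lt_trans hlt ((List.pairwise_cons.1 hy).1 k h)
    have hnotin : a ∉ (b :: ys) := by
      intro h
      rcases List.mem_cons.1 h with rfl | h
      · exact hab rfl
      · exact absurd (lt_trans hlt ((List.pairwise_cons.1 hy).1 a h)) (lt_irrefl a)
    rw [pvMerge, pvKeys]
    simp only [if_neg hab, if_pos hlt]
    rw [ih hx.2 hy]
    simp only [List.map_cons, Prod.mk.injEq]
    constructor
    · rw [if_pos (List.mem_cons_self ..)]
      refine congrArg _ (List.map_congr_left fun k hk => ?_)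
      simp [List.mem_cons, (hka k hk).ne']
    · rw [if_neg hnotin]
  | case5 a xs b ys hab hlt ih =>
    have hba : b < a := by
      rcases lt_trichotomy a b with h | h | h
      · exact absurd h hlt
      · exact absurd h hab
      · exact h
    rw [List.pairwise_cons] at hy
    have hkb : ∀ k ∈ pvKeys (a :: xs) ys, b < k := by
      intro k hk
      rcases (mem_pvKeys _ _ _).1 hk with h | h
      · rcases List.mem_cons.1 h with rfl | h
        · exact hba
        · exact lt_trans hba ((List.pairwise_cons.1 hx).1 k h)
      · exact hy.1 k h
    have hnotin : b ∉ (a :: xs) := by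
      intro h
      rcases List.mem_cons.1 h with rfl | h
      · exact lt_irrefl b hba
      · exact absurd (lt_trans hba ((List.pairwise_cons.1 hx).1 b h)) (lt_irrefl b)
    rw [pvMerge, pvKeys]
    simp only [if_neg hab, if_neg hlt]
    rw [ih hx hy.2]
    simp only [List.map_cons, Prod.mk.injEq]
    constructor
    · rw [if_neg hnotin]
    · rw [if_pos (List.mem_cons_self ..)]
      refine congrArg _ (List.map_congr_left fun k hk => ?_)
      simp [List.mem_cons, (hkb k hk).ne']

-- ===== VERDICT (by name: the statement is the Claim_ definition above) =====
theorem get_filling_in_missing_spec : Claim_equal_get_filling_in_missing := by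
  intro l1 l2 fill _
  unfold Spec_get_filling_in_missing get_filling_in_missing get_filling_in_missing_alt
  set s1 := PySem.List.sorted (PySem.Set.ofList l1) (fun x => x) false with hs1
  set s2 := PySem.List.sorted (PySem.Set.ofList l2) (fun x => x) false with hs2
  have hp1 : s1.Pairwise (· < ·) := PySem.List.sorted_ofList_pairwise_lt l1
  have hp2 : s2.Pairwise (· < ·) := PySem.List.sorted_ofList_pairwise_lt l2
  have hmem1 : ∀ k : String, k ∈ s1 ↔ k ∈ l1 := by
    intro k; rw [hs1, PySem.List.mem_sorted, PySem.Set.mem_ofList]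
  have hmem2 : ∀ k : String, k ∈ s2 ↔ k ∈ l2 := by
    intro k; rw [hs2, PySem.List.mem_sorted, PySem.Set.mem_ofList]
  have hU : PySem.List.sorted (PySem.Set.ofList (l1 ++ l2)) (fun x => x) false = pvKeys s1 s2 := by
    apply PySem.List.sorted_eq_of_perm_of_pairwise_lt
    · apply (List.perm_ext_iff_of_nodup ?_ ?_).2
      · intro k
        rw [mem_pvKeys, PySem.Set.mem_ofList, List.mem_append, hmem1, hmem2]
      · exact (pairwise_pvKeys s1 s2 hp1 hp2).imp ne_of_lt
      · exact PySem.Set.nodup_ofList (l1 ++ l2)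
    · exact pairwise_pvKeys s1 s2 hp1 hp2
  rw [hU]
  rw [PySem.List.foldl_prod_mk
        (fun r1 key => r1 ++ [if key ∈ l1 then key else pvEmpty fill key])
        (fun r2 key => r2 ++ [if key ∈ l2 then key else pvEmpty fill key])]
  rw [PySem.List.foldl_append_singleton_eq_map, PySem.List.foldl_append_singleton_eq_map]
  rw [pvMerge_eq fill s1 s2 hp1 hp2]
  simp only [Prod.mk.injEq]
  constructor
  · exact List.map_congr_left (fun k _ => by simp only [hmem1])
  · exact List.map_congr_left (fun k _ => by simp only [hmem2])
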